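-- pv_equiv track=rewrite | github.com/gribon/five-in-a-row-project | 5inarow.py | bf_one_row
-- ===== SOURCE A (Python) =====
-- def bf_one_row(s):
--     if len(s) < 5:
--         return 0, 0, 0
--     if s.find("xxxxx") != -1:
--         return 1000000, 0, 0
--     if s.find(".xxxx.") != -1:
--         return 30000, 0, 1
--     if s.find("xxx.x.xxx") != -1 or s.find("x.xxx.x") != -1 or s.find("xx.xx.xx") != -1:
--         return 3000, 0, 1
--     is3 = is4 = 0
--     for i in range(len(s)):
--         p = s[:i] + "x" + s[i + 1:]
--         if p.find("xxxxx") != -1: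
--             is4 += 1
--         elif p.find(".xxxx.") != -1:
--             is3 += 1
--     if is3 > 0 or is4 > 0:
--         return 1000 + 10 * (is3 + is4), is3, is4
--     count = 0
--     for i in range(len(s)):
--         for j in range(len(s)):
--             mmin = min(i, j)
--             mmax = max(i, j)
--             p = s[:mmin] + "x" + s[mmin + 1 : mmax] + ("x" if i != j else "") + s[mmax + 1:]
--             if p.find("xxxxx") != -1 or p.find(".xxxx.") != -1:
--                 count += 1
--                 break
--     return 10 * count, 0, 0
-- ===== SOURCE B (Python) =====
-- def bf_one_row(s):
--     n = len(s)
--     if n < 5: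
--         return 0, 0, 0
--     if "xxxxx" in s:
--         return 1000000, 0, 0
--     if ".xxxx." in s:
--         return 30000, 0, 1
--     if "xxx.x.xxx" in s or "x.xxx.x" in s or "xx.xx.xx" in s:
--         return 3000, 0, 1
--
--     def fits(pat, start, forced):
--         # pattern occurs at 'start' once the positions in 'forced' are forced to 'x'
--         if start < 0 or start + len(pat) > n:
--             return False
--         for k in range(len(pat)):
--             pos = start + k
--             c = 'x' if pos in forced else s[pos]
--             if c != pat[k]:
--                 return False
--         return True
--
--     def five_at(forced, a):
--         # a window through position 'a' becomes "xxxxx"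
--         return any(fits("xxxxx", a - k, forced) for k in range(5))
--
--     def open4_at(forced, a):
--         # a window through position 'a' becomes ".xxxx."
--         return any(fits(".xxxx.", a - k, forced) for k in range(6))
--
--     is3 = is4 = 0
--     for i in range(n):
--         if five_at([i], i):
--             is4 += 1
--         elif open4_at([i], i):
--             is3 += 1
--     if is3 > 0 or is4 > 0:
--         return 1000 + 10 * (is3 + is4), is3, is4
--
--     count = 0
--     for i in range(n):
--         if any(five_at([i, j], min(i, j)) or open4_at([i, j], min(i, j))
--                for j in range(max(0, i - 5), min(n, i + 6))):
--             count += 1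
--     return 10 * count, 0, 0
-- ===== Notes on version B (the rewrite author's own statement) =====
-- stated objective: faster
-- what changed: Instead of rebuilding the whole string and rescanning it with find() for every stone placement (and every placement pair), B checks only the constant-size pattern windows that cover the placed stone(s) and, in the pair loop, only partners within distance 5, turning the O(n^3) placement-pair scan into an O(n) pass with constant-size window checks.
import Mathlib
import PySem

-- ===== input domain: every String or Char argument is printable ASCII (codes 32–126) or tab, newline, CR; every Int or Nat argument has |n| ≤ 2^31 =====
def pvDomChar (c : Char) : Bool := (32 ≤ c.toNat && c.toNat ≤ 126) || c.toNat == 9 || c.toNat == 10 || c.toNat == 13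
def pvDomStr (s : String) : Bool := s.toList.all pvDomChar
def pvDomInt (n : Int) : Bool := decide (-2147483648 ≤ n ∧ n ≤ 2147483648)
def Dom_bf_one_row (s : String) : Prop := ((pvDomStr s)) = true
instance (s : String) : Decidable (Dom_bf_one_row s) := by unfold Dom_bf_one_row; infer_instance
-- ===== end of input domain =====

-- B replaces A's "rebuild the whole string and rescan it for every placement" (and every placement PAIR)
-- by constant-size window checks around the placed stone(s): objective 'faster' (asymptotic).

-- ===== PORT A =====
-- the two scored patterns, as character lists
def pvT5 : List Char := ['x','x','x','x','x']
def pvT6 : List Char := ['.','x','x','x','x','.']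

-- s[:i] + "x" + s[i+1:]
def pvRep1 (l : List Char) (i : Nat) : List Char := l.take i ++ 'x' :: l.drop (i+1)

-- s[:mmin] + "x" + s[mmin+1:mmax] + ("x" if i != j else "") + s[mmax+1:]
def pvRep2 (l : List Char) (i j : Nat) : List Char :=
  let mmin := min i j
  let mmax := max i j
  l.take mmin ++ 'x' :: ((l.drop (mmin+1)).take (mmax - (mmin+1)) ++
    (if i = j then [] else ['x']) ++ l.drop (mmax+1))

-- p.find(t) != -1
def pvFound (p t : List Char) : Bool := PySem.Chars.find p t != -1

-- the is3/is4 accumulation loop body (state = (is3, is4))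
def pvStepA (l : List Char) (st : Int × Int) (i : Nat) : Int × Int :=
  let p := pvRep1 l i
  if pvFound p pvT5 then (st.1, st.2 + 1)
  else if pvFound p pvT6 then (st.1 + 1, st.2)
  else st

-- inner j-scan of the final double loop (break ≡ existence)
def pvAnyA (l : List Char) (i : Nat) : Bool :=
  (List.range l.length).any (fun j =>
    let p := pvRep2 l i j
    pvFound p pvT5 || pvFound p pvT6)

def pvRunA (l : List Char) : List Int :=
  if l.length < 5 then [0, 0, 0]
  else if pvFound l pvT5 then [1000000, 0, 0]
  else if pvFound l pvT6 then [30000, 0, 1]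
  else if pvFound l "xxx.x.xxx".toList || pvFound l "x.xxx.x".toList || pvFound l "xx.xx.xx".toList then
    [3000, 0, 1]
  else
    let st := (List.range l.length).foldl (pvStepA l) (0, 0)
    if st.1 > 0 ∨ st.2 > 0 then [1000 + 10 * (st.1 + st.2), st.1, st.2]
    else
      let count := (List.range l.length).foldl
        (fun c i => if pvAnyA l i then c + 1 else c) (0 : Int)
      [10 * count, 0, 0]

def bf_one_row (s : String) : List Int := pvRunA s.toList

-- ===== PORT B =====
-- does pat occur at 'start' once the positions in 'forced' are forced to 'x'?
def pvFits (l : List Char) (pat : List Char) (start : Int) (forced : List Nat) : Bool :=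
  if start < 0 || start + pat.length > l.length then false
  else (List.range pat.length).all (fun k =>
    (if start.toNat + k ∈ forced then 'x' else l.getD (start.toNat + k) ' ') == pat.getD k ' ')

-- a window through position a becomes "xxxxx"
def pvFiveAt (l : List Char) (forced : List Nat) (a : Nat) : Bool :=
  (List.range 5).any (fun k => pvFits l pvT5 ((a : Int) - k) forced)

-- a window through position a becomes ".xxxx."
def pvOpen4At (l : List Char) (forced : List Nat) (a : Nat) : Bool :=
  (List.range 6).any (fun k => pvFits l pvT6 ((a : Int) - k) forced)

def pvStepB (l : List Char) (st : Int × Int) (i : Nat) : Int × Int :=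
  if pvFiveAt l [i] i then (st.1, st.2 + 1)
  else if pvOpen4At l [i] i then (st.1 + 1, st.2)
  else st

-- for j in range(max(0, i-5), min(n, i+6))
def pvAnyB (l : List Char) (i : Nat) : Bool :=
  let lo := i - 5
  let hi := min l.length (i + 6)
  (List.range' lo (hi - lo)).any (fun j =>
    pvFiveAt l [i, j] (min i j) || pvOpen4At l [i, j] (min i j))

def pvRunB (l : List Char) : List Int :=
  if l.length < 5 then [0, 0, 0]
  else if PySem.Chars.isIn pvT5 l then [1000000, 0, 0]
  else if PySem.Chars.isIn pvT6 l then [30000, 0, 1]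
  else if PySem.Chars.isIn "xxx.x.xxx".toList l || PySem.Chars.isIn "x.xxx.x".toList l
          || PySem.Chars.isIn "xx.xx.xx".toList l then
    [3000, 0, 1]
  else
    let st := (List.range l.length).foldl (pvStepB l) (0, 0)
    if st.1 > 0 ∨ st.2 > 0 then [1000 + 10 * (st.1 + st.2), st.1, st.2]
    else
      let count := (List.range l.length).foldl
        (fun c i => if pvAnyB l i then c + 1 else c) (0 : Int)
      [10 * count, 0, 0]

def bf_one_row_alt (s : String) : List Int := pvRunB s.toList

-- ===== PRECONDITION & SPEC =====
def Spec_bf_one_row (s : String) (out : List Int) : Prop := out = bf_one_row_alt s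
instance (s : String) (out : List Int) : Decidable (Spec_bf_one_row s out) := by unfold Spec_bf_one_row; infer_instance

-- ===== CLAIM (what is proved, stated in full; the proofs are below) =====
def Claim_equal_bf_one_row : Prop := ∀ (s : String), Dom_bf_one_row s → Spec_bf_one_row s (bf_one_row s)

-- ===== proof layer =====

-- the character at m once the positions in F are forced to 'x'
def pvFG (l : List Char) (F : List Nat) (m : Nat) : Char :=
  if m ∈ F then 'x' else l.getD m ' '

-- pat occurs at st in l-with-F-forced
def pvMA (l pat : List Char) (st : Nat) (F : List Nat) : Prop :=
  st + pat.length ≤ l.length ∧ ∀ k < pat.length, pvFG l F (st + k) = pat.getD k ' '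

lemma pvPrefix_iff (t v : List Char) :
    t <+: v ↔ t.length ≤ v.length ∧ ∀ k < t.length, v.getD k ' ' = t.getD k ' ' := by
  constructor
  · intro h
    refine ⟨h.length_le, fun k hk => ?_⟩
    rw [List.prefix_iff_eq_take] at h
    conv_rhs => rw [h]
    simp [List.getD, hk]
  · rintro ⟨hl, h⟩
    rw [List.prefix_iff_eq_take]
    apply List.ext_getElem
    · simp [Nat.min_eq_left hl]
    · intro k hk1 hk2
      have := h k hk1
      simp [List.getD] at this
      simp at this ⊢
      rw [List.getElem?_eq_getElem (by omega), List.getElem?_eq_getElem (by omega)] at this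
      simp at this
      exact this.symm

lemma pvOcc_iff (u t : List Char) (ht : t ≠ []) :
    t <:+: u ↔ ∃ st, st + t.length ≤ u.length ∧ ∀ k < t.length, u.getD (st + k) ' ' = t.getD k ' ' := by
  rw [← PySem.Chars.isIn_iff_infix, ← PySem.Chars.exists_prefix_drop_iff_isIn]
  constructor
  · rintro ⟨j, hj⟩
    refine ⟨j, ?_, ?_⟩
    · have h1 : t.length ≤ u.length - j := by simpa using ((pvPrefix_iff t (u.drop j)).1 hj).1
      have h2 : 1 ≤ t.length := List.length_pos_of_ne_nil ht
      omega
    · intro k hk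
      have h1 := ((pvPrefix_iff t (u.drop j)).1 hj).2 k hk
      rwa [List.getD, List.getElem?_drop, ← List.getD] at h1
  · rintro ⟨st, h1, h2⟩
    refine ⟨st, (pvPrefix_iff t (u.drop st)).2 ⟨by simp; omega, fun k hk => ?_⟩⟩
    rw [List.getD, List.getElem?_drop, ← List.getD]
    exact h2 k hk

lemma pvRep1_eq_set (l : List Char) (i : Nat) (hi : i < l.length) :
    pvRep1 l i = l.set i 'x' := by
  rw [pvRep1, List.set_eq_take_cons_drop 'x' hi]

lemma pvRep2_eq_set (l : List Char) (i j : Nat) (hi : i < l.length) (hj : j < l.length) :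
    pvRep2 l i j = (l.set (min i j) 'x').set (max i j) 'x' := by
  rcases eq_or_ne i j with rfl | hne
  · simp only [min_self, max_self, List.set_set]
    rw [pvRep2]
    simp [List.set_eq_take_cons_drop 'x' hi]
  · have hmm : min i j < max i j := by omega
    have hmax : max i j < l.length := by omega
    rw [pvRep2, List.set_eq_take_cons_drop 'x' (by omega : min i j < l.length)]
    rw [List.set_append]
    simp only [List.length_take]
    have hmin : min (min i j) l.length = min i j := by omega
    rw [hmin, if_neg (by omega)]
    have h1 : max i j - min i j = (max i j - min i j - 1) + 1 := by omega
    rw [h1, List.set_cons_succ]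
    rw [List.set_eq_take_cons_drop 'x' (by simp; omega : max i j - min i j - 1 < (l.drop (min i j + 1)).length)]
    simp only [List.drop_drop]
    rw [if_neg (by omega)]
    have e1 : max i j - (min i j + 1) = max i j - min i j - 1 := by omega
    have e2 : min i j + 1 + (max i j - min i j - 1 + 1) = max i j + 1 := by omega
    simp [e1, e2]

lemma pvLen_rep1 (l : List Char) (i : Nat) (hi : i < l.length) :
    (pvRep1 l i).length = l.length := by rw [pvRep1_eq_set l i hi]; simp

lemma pvLen_rep2 (l : List Char) (i j : Nat) (hi : i < l.length) (hj : j < l.length) :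
    (pvRep2 l i j).length = l.length := by rw [pvRep2_eq_set l i j hi hj]; simp

lemma pvGetD_set (l : List Char) (i m : Nat) (c : Char) (hi : i < l.length) :
    (l.set i c).getD m ' ' = if m = i then c else l.getD m ' ' := by
  rw [List.getD, List.getElem?_set]
  rcases eq_or_ne i m with rfl | hne
  · simp [hi]
  · simp [hne, Ne.symm hne, List.getD]

lemma pvGetD_rep1 (l : List Char) (i m : Nat) (hi : i < l.length) :
    (pvRep1 l i).getD m ' ' = pvFG l [i] m := by
  rw [pvRep1_eq_set l i hi, pvGetD_set l i m 'x' hi, pvFG]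
  simp

lemma pvGetD_rep2 (l : List Char) (i j m : Nat) (hi : i < l.length) (hj : j < l.length) :
    (pvRep2 l i j).getD m ' ' = pvFG l [i, j] m := by
  rw [pvRep2_eq_set l i j hi hj,
    pvGetD_set _ (max i j) m 'x' (by simp; omega),
    pvGetD_set l (min i j) m 'x' (by omega), pvFG]
  simp only [List.mem_cons, List.not_mem_nil, or_false]
  rcases Nat.le_total i j with h | h
  · by_cases h1 : m = i <;> by_cases h2 : m = j <;> simp_all
  · by_cases h1 : m = i <;> by_cases h2 : m = j <;> simp_all

-- pvFound as occurrence of pvMA with no forced positions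
lemma pvFG_nil (l : List Char) (m : Nat) : pvFG l [] m = l.getD m ' ' := by simp [pvFG]

lemma pvFound_iff (u t : List Char) (ht : t ≠ []) :
    pvFound u t = true ↔ ∃ st, pvMA u t st [] := by
  rw [pvFound, bne_iff_ne, ne_eq, ← not_not (a := PySem.Chars.find u t = -1)]
  rw [not_not, ← ne_eq, PySem.Chars.find_ne_neg_one_iff, pvOcc_iff u t ht]
  unfold pvMA
  simp only [pvFG_nil]

lemma pvMA_rep1 (l t : List Char) (i st : Nat) (hi : i < l.length) :
    pvMA (pvRep1 l i) t st [] ↔ pvMA l t st [i] := by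
  unfold pvMA
  rw [pvLen_rep1 l i hi]
  constructor <;> rintro ⟨h1, h2⟩ <;> refine ⟨h1, fun k hk => ?_⟩
  · rw [← pvGetD_rep1 l i (st+k) hi, ← pvFG_nil]; exact h2 k hk
  · rw [pvFG_nil, pvGetD_rep1 l i (st+k) hi]; exact h2 k hk

lemma pvMA_rep2 (l t : List Char) (i j st : Nat) (hi : i < l.length) (hj : j < l.length) :
    pvMA (pvRep2 l i j) t st [] ↔ pvMA l t st [i, j] := by
  unfold pvMA
  rw [pvLen_rep2 l i j hi hj]
  constructor <;> rintro ⟨h1, h2⟩ <;> refine ⟨h1, fun k hk => ?_⟩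
  · rw [← pvGetD_rep2 l i j (st+k) hi hj, ← pvFG_nil]; exact h2 k hk
  · rw [pvFG_nil, pvGetD_rep2 l i j (st+k) hi hj]; exact h2 k hk

lemma pvT5_ne : pvT5 ≠ [] := by decide
lemma pvT6_ne : pvT6 ≠ [] := by decide

lemma pvFits_iff (l pat : List Char) (start : Int) (F : List Nat) :
    pvFits l pat start F = true ↔ 0 ≤ start ∧ pvMA l pat start.toNat F := by
  unfold pvFits pvMA pvFG
  by_cases hb : start < 0 ∨ start + (pat.length : Int) > (l.length : Int)
  · rw [if_pos (by simp only [Bool.or_eq_true, decide_eq_true_eq]; exact hb)]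
    simp only [Bool.false_eq_true, false_iff, not_and]
    rintro h0 hA
    exact absurd hA (by omega)
  · have hb1 : 0 ≤ start ∧ start + (pat.length : Int) ≤ (l.length : Int) := by
      constructor <;> by_contra hc <;> exact hb (by omega)
    rw [if_neg (by simp only [Bool.or_eq_true, decide_eq_true_eq]; omega)]
    simp only [List.all_eq_true, List.mem_range, beq_iff_eq]
    constructor
    · intro hall
      exact ⟨hb1.1, by omega, fun k hk => hall k hk⟩
    · rintro ⟨_, _, h2⟩ k hk
      exact h2 k hk

lemma pvFiveAt_iff (l : List Char) (F : List Nat) (a : Nat) :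
    pvFiveAt l F a = true ↔ ∃ st, st ≤ a ∧ a < st + 5 ∧ pvMA l pvT5 st F := by
  unfold pvFiveAt
  simp only [List.any_eq_true, List.mem_range]
  constructor
  · rintro ⟨k, hk, hf⟩
    obtain ⟨h0, hma⟩ := (pvFits_iff l pvT5 _ F).1 hf
    refine ⟨((a : Int) - k).toNat, by omega, by omega, hma⟩
  · rintro ⟨st, h1, h2, hma⟩
    refine ⟨a - st, by omega, (pvFits_iff l pvT5 _ F).2 ⟨by omega, ?_⟩⟩
    have : ((a : Int) - (a - st : Nat)).toNat = st := by omega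
    rwa [this]

lemma pvOpen4At_iff (l : List Char) (F : List Nat) (a : Nat) :
    pvOpen4At l F a = true ↔ ∃ st, st ≤ a ∧ a < st + 6 ∧ pvMA l pvT6 st F := by
  unfold pvOpen4At
  simp only [List.any_eq_true, List.mem_range]
  constructor
  · rintro ⟨k, hk, hf⟩
    obtain ⟨h0, hma⟩ := (pvFits_iff l pvT6 _ F).1 hf
    refine ⟨((a : Int) - k).toNat, by omega, by omega, hma⟩
  · rintro ⟨st, h1, h2, hma⟩
    refine ⟨a - st, by omega, (pvFits_iff l pvT6 _ F).2 ⟨by omega, ?_⟩⟩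
    have : ((a : Int) - (a - st : Nat)).toNat = st := by omega
    rwa [this]

lemma pvMA_congr (l pat : List Char) (st : Nat) {F F' : List Nat}
    (h : ∀ m, st ≤ m → m < st + pat.length → (m ∈ F ↔ m ∈ F')) :
    pvMA l pat st F ↔ pvMA l pat st F' := by
  unfold pvMA pvFG
  constructor <;> rintro ⟨h1, h2⟩ <;> refine ⟨h1, fun k hk => ?_⟩
  · rw [if_congr (iff_of_eq (propext (h (st+k) (by omega) (by omega))).symm) rfl rfl]
    exact h2 k hk
  · rw [if_congr (h (st+k) (by omega) (by omega)) rfl rfl]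
    exact h2 k hk

lemma pvCondA1_iff (l t : List Char) (i : Nat) (ht : t ≠ []) (hi : i < l.length) :
    pvFound (pvRep1 l i) t = true ↔ ∃ st, pvMA l t st [i] := by
  rw [pvFound_iff _ t ht]
  exact exists_congr fun st => pvMA_rep1 l t i st hi

lemma pvCondA2_iff (l t : List Char) (i j : Nat) (ht : t ≠ []) (hi : i < l.length)
    (hj : j < l.length) :
    pvFound (pvRep2 l i j) t = true ↔ ∃ st, pvMA l t st [i, j] := by
  rw [pvFound_iff _ t ht]
  exact exists_congr fun st => pvMA_rep2 l t i j st hi hj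

-- if nothing matches in l itself, a single-placement match must cover the placed position
lemma pvWindow1 (l t : List Char) (i : Nat) (Hocc : ¬∃ st, pvMA l t st []) :
    (∃ st, pvMA l t st [i]) ↔ ∃ st, st ≤ i ∧ i < st + t.length ∧ pvMA l t st [i] := by
  constructor
  · rintro ⟨st, hma⟩
    by_cases hw : st ≤ i ∧ i < st + t.length
    · exact ⟨st, hw.1, hw.2, hma⟩
    · exfalso
      apply Hocc
      refine ⟨st, (pvMA_congr l t st (fun m h1 h2 => ?_)).1 hma⟩
      simp only [List.mem_singleton, List.not_mem_nil, iff_false]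
      omega
  · rintro ⟨st, _, _, hma⟩
    exact ⟨st, hma⟩

-- a pair-placement match must cover both placed positions
lemma pvWindow2 (l t : List Char) (i j st : Nat)
    (Hocc : ¬∃ st, pvMA l t st [])
    (HS : ∀ m, m < l.length → ¬∃ st, pvMA l t st [m])
    (hi : i < l.length) (hj : j < l.length)
    (hma : pvMA l t st [i, j]) :
    st ≤ i ∧ i < st + t.length ∧ st ≤ j ∧ j < st + t.length := by
  by_cases hwi : st ≤ i ∧ i < st + t.length
  · by_cases hwj : st ≤ j ∧ j < st + t.length
    · exact ⟨hwi.1, hwi.2, hwj.1, hwj.2⟩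
    · exfalso
      apply HS i hi
      refine ⟨st, (pvMA_congr l t st (fun m h1 h2 => ?_)).1 hma⟩
      simp only [List.mem_cons, List.not_mem_nil, or_false]
      constructor
      · rintro (rfl | rfl)
        · rfl
        · omega
      · intro h; exact Or.inl h
  · by_cases hwj : st ≤ j ∧ j < st + t.length
    · exfalso
      apply HS j hj
      refine ⟨st, (pvMA_congr l t st (fun m h1 h2 => ?_)).1 hma⟩
      simp only [List.mem_cons, List.not_mem_nil, or_false]
      constructor
      · rintro (rfl | rfl)
        · omega
        · rfl
      · intro h; exact Or.inr h
    · exfalso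
      apply Hocc
      refine ⟨st, (pvMA_congr l t st (fun m h1 h2 => ?_)).1 hma⟩
      simp only [List.mem_cons, List.not_mem_nil, or_false, iff_false]
      rintro (rfl | rfl) <;> omega

-- per-index branch tests of A's first loop
def pvQ4 (l : List Char) (i : Nat) : Bool := pvFound (pvRep1 l i) pvT5
def pvQ3 (l : List Char) (i : Nat) : Bool := !pvQ4 l i && pvFound (pvRep1 l i) pvT6

lemma pvFoldA_char (l : List Char) (xs : List Nat) (a b : Int) :
    xs.foldl (pvStepA l) (a, b) =
      (a + (xs.countP (pvQ3 l) : Int), b + (xs.countP (pvQ4 l) : Int)) := by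
  induction xs generalizing a b with
  | nil => simp
  | cons x xs ih =>
    simp only [List.foldl_cons, List.countP_cons, pvStepA, pvQ3, pvQ4]
    by_cases h4 : pvFound (pvRep1 l x) pvT5 = true
    · rw [if_pos h4, ih]
      simp [h4]
      omega
    · rw [if_neg h4]
      by_cases h6 : pvFound (pvRep1 l x) pvT6 = true
      · rw [if_pos h6, ih]
        simp [h4, h6]
        omega
      · rw [if_neg h6, ih]
        simp [h4, h6]

-- B's first loop takes the same branches as A's, index by index
lemma pvStep_eq (l : List Char) (i : Nat) (hi : i < l.length)
    (Hocc5 : ¬∃ st, pvMA l pvT5 st []) (Hocc6 : ¬∃ st, pvMA l pvT6 st [])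
    (st : Int × Int) :
    pvStepA l st i = pvStepB l st i := by
  have h5 : pvFound (pvRep1 l i) pvT5 = pvFiveAt l [i] i := by
    rw [Bool.eq_iff_iff, pvCondA1_iff l pvT5 i pvT5_ne hi, pvFiveAt_iff,
      pvWindow1 l pvT5 i Hocc5]
    exact exists_congr fun st => by
      have : pvT5.length = 5 := by decide
      rw [this]
  have h6 : pvFound (pvRep1 l i) pvT6 = pvOpen4At l [i] i := by
    rw [Bool.eq_iff_iff, pvCondA1_iff l pvT6 i pvT6_ne hi, pvOpen4At_iff,
      pvWindow1 l pvT6 i Hocc6]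
    exact exists_congr fun st => by
      have : pvT6.length = 6 := by decide
      rw [this]
  rw [pvStepA, pvStepB, h5, h6]

-- existence form of A's inner j-scan
def pvEA (l : List Char) (i : Nat) : Prop :=
  ∃ j, j < l.length ∧ ∃ st, pvMA l pvT5 st [i, j] ∨ pvMA l pvT6 st [i, j]

lemma pvAnyA_iff (l : List Char) (i : Nat) (hi : i < l.length) :
    pvAnyA l i = true ↔ pvEA l i := by
  unfold pvAnyA pvEA
  simp only [List.any_eq_true, List.mem_range, Bool.or_eq_true]
  constructor
  · rintro ⟨j, hj, h | h⟩
    · obtain ⟨st, hst⟩ := (pvCondA2_iff l pvT5 i j pvT5_ne hi hj).1 h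
      exact ⟨j, hj, st, Or.inl hst⟩
    · obtain ⟨st, hst⟩ := (pvCondA2_iff l pvT6 i j pvT6_ne hi hj).1 h
      exact ⟨j, hj, st, Or.inr hst⟩
  · rintro ⟨j, hj, st, h | h⟩
    · exact ⟨j, hj, Or.inl ((pvCondA2_iff l pvT5 i j pvT5_ne hi hj).2 ⟨st, h⟩)⟩
    · exact ⟨j, hj, Or.inr ((pvCondA2_iff l pvT6 i j pvT6_ne hi hj).2 ⟨st, h⟩)⟩

lemma pvAnyB_iff (l : List Char) (i : Nat) (hi : i < l.length)
    (Hocc5 : ¬∃ st, pvMA l pvT5 st []) (Hocc6 : ¬∃ st, pvMA l pvT6 st [])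
    (HS5 : ∀ m, m < l.length → ¬∃ st, pvMA l pvT5 st [m])
    (HS6 : ∀ m, m < l.length → ¬∃ st, pvMA l pvT6 st [m]) :
    pvAnyB l i = true ↔ pvEA l i := by
  unfold pvAnyB pvEA
  simp only [List.any_eq_true, List.mem_range'_1, Bool.or_eq_true]
  constructor
  · rintro ⟨j, hj, h | h⟩
    · obtain ⟨st, _, _, hst⟩ := (pvFiveAt_iff l [i, j] (min i j)).1 h
      exact ⟨j, by omega, st, Or.inl hst⟩
    · obtain ⟨st, _, _, hst⟩ := (pvOpen4At_iff l [i, j] (min i j)).1 h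
      exact ⟨j, by omega, st, Or.inr hst⟩
  · rintro ⟨j, hj, st, h | h⟩
    · have hw := pvWindow2 l pvT5 i j st Hocc5 HS5 hi hj h
      have h5 : pvT5.length = 5 := by decide
      rw [h5] at hw
      refine ⟨j, ⟨by omega, by omega⟩, Or.inl ?_⟩
      exact (pvFiveAt_iff l [i, j] (min i j)).2 ⟨st, by omega, by omega, h⟩
    · have hw := pvWindow2 l pvT6 i j st Hocc6 HS6 hi hj h
      have h6 : pvT6.length = 6 := by decide
      rw [h6] at hw
      refine ⟨j, ⟨by omega, by omega⟩, Or.inr ?_⟩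
      exact (pvOpen4At_iff l [i, j] (min i j)).2 ⟨st, by omega, by omega, h⟩

lemma pvFound_eq_isIn (u t : List Char) : pvFound u t = PySem.Chars.isIn t u := by
  rw [Bool.eq_iff_iff, pvFound, bne_iff_ne, ne_eq, ← ne_eq,
    PySem.Chars.find_ne_neg_one_iff, PySem.Chars.isIn_iff_infix]

lemma pvNotOcc (l t : List Char) (ht : t ≠ []) (h : ¬PySem.Chars.isIn t l = true) :
    ¬∃ st, pvMA l t st [] := by
  rw [← pvFound_eq_isIn, pvFound_iff l t ht] at h
  exact h

theorem pvRun_eq (l : List Char) : pvRunA l = pvRunB l := by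
  unfold pvRunA pvRunB
  rw [pvFound_eq_isIn l pvT5, pvFound_eq_isIn l pvT6, pvFound_eq_isIn, pvFound_eq_isIn,
    pvFound_eq_isIn]
  split_ifs with hlen h5 h6 h9
  · rfl
  · rfl
  · rfl
  · rfl
  have Hocc5 := pvNotOcc l pvT5 pvT5_ne h5
  have Hocc6 := pvNotOcc l pvT6 pvT6_ne h6
  have hfold : (List.range l.length).foldl (pvStepA l) (0, 0) =
      (List.range l.length).foldl (pvStepB l) (0, 0) :=
    PySem.List.foldl_congr_mem _ _ _ _ fun st i hi =>
      pvStep_eq l i (List.mem_range.1 hi) Hocc5 Hocc6 st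
  rw [← hfold]
  by_cases hpos : ((List.range l.length).foldl (pvStepA l) (0, 0)).1 > 0 ∨
      ((List.range l.length).foldl (pvStepA l) (0, 0)).2 > 0
  · simp only [if_pos hpos]
  · simp only [if_neg hpos]
    -- extract: no single placement makes "xxxxx" or ".xxxx."
    rw [pvFoldA_char l (List.range l.length) 0 0] at hpos
    simp only [zero_add] at hpos
    have hc3 : (List.range l.length).countP (pvQ3 l) = 0 := by omega
    have hc4 : (List.range l.length).countP (pvQ4 l) = 0 := by omega
    have HS5 : ∀ m, m < l.length → ¬∃ st, pvMA l pvT5 st [m] := by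
      intro m hm
      have h := Std.Internal.List.not_of_countP_eq_zero_of_mem hc4 (List.mem_range.2 hm)
      rw [← pvCondA1_iff l pvT5 m pvT5_ne hm]
      simpa [pvQ4] using h
    have HS6 : ∀ m, m < l.length → ¬∃ st, pvMA l pvT6 st [m] := by
      intro m hm
      have h3 := Std.Internal.List.not_of_countP_eq_zero_of_mem hc3 (List.mem_range.2 hm)
      have h4 := Std.Internal.List.not_of_countP_eq_zero_of_mem hc4 (List.mem_range.2 hm)
      rw [← pvCondA1_iff l pvT6 m pvT6_ne hm]
      simp only [pvQ3, pvQ4, Bool.and_eq_true, Bool.not_eq_true'] at h3 h4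
      intro hex
      exact h3 ⟨by simp [h4], hex⟩
    have hany : (List.range l.length).foldl
          (fun (c : Int) i => if pvAnyA l i then c + 1 else c) 0 =
        (List.range l.length).foldl
          (fun (c : Int) i => if pvAnyB l i then c + 1 else c) 0 := by
      refine PySem.List.foldl_congr_mem _ _ _ _ fun c i hi => ?_
      have hilt := List.mem_range.1 hi
      have : pvAnyA l i = pvAnyB l i := by
        rw [Bool.eq_iff_iff, pvAnyA_iff l i hilt,
          pvAnyB_iff l i hilt Hocc5 Hocc6 HS5 HS6]
      rw [this]
    rw [hany]

theorem pvRun_eq_str (s : String) : bf_one_row s = bf_one_row_alt s := pvRun_eq s.toList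

-- ===== VERDICT (by name: the statement is the Claim_ definition above) =====
theorem bf_one_row_spec : Claim_equal_bf_one_row := by
  intro s _
  unfold Spec_bf_one_row
  exact pvRun_eq_str s
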